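-- pv_equiv track=rewrite | github.com/gg-cyber172/PuyoPuyoTetrisAi | src/PuyoPuyo/aiPuyoPuyoScript.py | heights
-- ===== SOURCE A (Python) =====
-- def heights(board):
--     sumHeight=0
--     maxHeight=0
--     for column in zip(*board):
--         i=0
--         while i<len(board) and column[i]==".":
--             i+=1
--         sumHeight+=len(board)-i
--         if maxHeight==0 or maxHeight<len(board)-i:
--             maxHeight=len(board)-i
--     return sumHeight,maxHeight
-- ===== SOURCE B (Python) =====
-- def heights(board):
--     rows = len(board)
--     ncols = min((len(r) for r in board), default=0)
--     height = [0] * ncols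
--     for i, row in enumerate(board):
--         for j in range(ncols):
--             if height[j] == 0 and row[j] != ".":
--                 height[j] = rows - i
--     return sum(height), max(height, default=0)
-- ===== Notes on version B (the rewrite author's own statement) =====
-- stated objective: alternative
-- what changed: Replaces A's column-at-a-time scan (zip(*board) plus a while loop counting leading dots per column) with a single row-major top-to-bottom pass that fills a per-column height array on the first non-'.' cell, then takes sum and max of that array.
import Mathlib
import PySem

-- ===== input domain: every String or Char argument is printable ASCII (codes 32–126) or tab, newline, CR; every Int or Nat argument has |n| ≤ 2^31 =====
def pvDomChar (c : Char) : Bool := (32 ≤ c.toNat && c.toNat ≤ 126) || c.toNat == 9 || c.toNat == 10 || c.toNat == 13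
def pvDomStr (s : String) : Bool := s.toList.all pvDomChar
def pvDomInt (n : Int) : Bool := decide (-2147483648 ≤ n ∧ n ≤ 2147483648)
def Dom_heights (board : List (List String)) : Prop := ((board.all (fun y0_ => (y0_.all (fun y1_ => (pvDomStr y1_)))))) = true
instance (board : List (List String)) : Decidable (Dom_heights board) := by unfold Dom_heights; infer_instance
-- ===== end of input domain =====

-- B replaces A's column-at-a-time scans (zip(*board) + a while loop per column) by a single
-- row-major top-to-bottom pass filling a height array, then sum/max; objective: alternative decomposition.

-- ===== PORT A =====
-- number of columns produced by zip(*board): min row length (0 for an empty board)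
def pvNcols : List (List String) → Nat
  | [] => 0
  | r :: rs => rs.foldl (fun m row => min m row.length) r.length

-- the while loop 'i=0; while i<len(board) and column[i]==".": i+=1' (column has length len(board),
-- so the count of leading "." is exactly the final i)
def pvWhileDots : List String → Nat
  | [] => 0
  | s :: t => if s == "." then pvWhileDots t + 1 else 0

-- index-based transcription of zip(*board): column j = [row[j] for row in board], j < pvNcols board
-- (getD is exact here since j is below every row's length)
def heights (board : List (List String)) : Int × Int :=
  ((List.range (pvNcols board)).map (fun j => board.map (fun row => row.getD j ""))).foldl
    (fun st column =>
      let i := pvWhileDots column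
      (st.1 + ((board.length : Int) - (i : Int)),
       if st.2 == 0 || st.2 < (board.length : Int) - (i : Int) then (board.length : Int) - (i : Int) else st.2))
    (0, 0)

-- ===== PORT B =====
def heights_alt (board : List (List String)) : Int × Int :=
  let rows := board.length
  let ncols := pvNcols board
  let height :=
    (PySem.List.enumerate board).foldl
      (fun (h : List Int) (p : Int × List String) =>
        (List.range ncols).foldl
          (fun h2 j =>
            if h2.getD j 0 == 0 && !(p.2.getD j "" == ".") then h2.set j ((rows : Int) - p.1) else h2)
          h)
      (List.replicate ncols 0)
  (height.foldl (· + ·) 0, height.foldl max 0)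

-- ===== PRECONDITION & SPEC =====
def Spec_heights (board : List (List String)) (out : Int × Int) : Prop := out = heights_alt board
instance (board : List (List String)) (out : Int × Int) : Decidable (Spec_heights board out) := by unfold Spec_heights; infer_instance

-- ===== CLAIM (what is proved, stated in full; the proofs are below) =====
def Claim_equal_heights : Prop := ∀ (board : List (List String)), Dom_heights board → Spec_heights board (heights board)

-- ===== LEMMAS AND PROOFS =====

-- the per-column height both programs compute
def pvH (board : List (List String)) (j : Nat) : Int :=
  (board.length : Int) - (pvWhileDots (board.map (fun row => row.getD j "")) : Int)

theorem pvWhileDots_le (l : List String) : pvWhileDots l ≤ l.length := by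
  induction l with
  | nil => simp [pvWhileDots]
  | cons s t ih =>
    by_cases h : s == "."
    · simp [pvWhileDots, h]; omega
    · simp [pvWhileDots, h]

theorem pvH_nonneg (board : List (List String)) (j : Nat) : 0 ≤ pvH board j := by
  have := pvWhileDots_le (board.map (fun row => row.getD j ""))
  simp only [List.length_map] at this
  unfold pvH; omega

-- inner-fold lemmas: each step of the pass over range m reads and writes only its own index
theorem inner_length (v : Int) (row : List String) (l : List Nat) (h : List Int) :
    (l.foldl
        (fun h2 j => if h2.getD j 0 == 0 && !(row.getD j "" == ".") then h2.set j v else h2) h).length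
      = h.length := by
  induction l generalizing h with
  | nil => rfl
  | cons x t ih =>
    simp only [List.foldl_cons]
    rw [ih]
    split <;> simp

theorem inner_getD (v : Int) (row : List String) :
    ∀ (m : Nat) (h : List Int), m ≤ h.length → ∀ (j : Nat),
    ((List.range m).foldl
        (fun h2 j => if h2.getD j 0 == 0 && !(row.getD j "" == ".") then h2.set j v else h2) h).getD j 0
      = if j < m ∧ h.getD j 0 = 0 ∧ row.getD j "" ≠ "." then v else h.getD j 0 := by
  intro m
  induction m with
  | zero => intro h _ j; simp
  | succ m ih =>
    intro h hm j
    rw [List.range_succ, List.foldl_append, List.foldl_cons, List.foldl_nil]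
    have hlen : ((List.range m).foldl
        (fun h2 j => if h2.getD j 0 == 0 && !(row.getD j "" == ".") then h2.set j v else h2) h).length
        = h.length := inner_length v row _ h
    set F := (List.range m).foldl
        (fun h2 j => if h2.getD j 0 == 0 && !(row.getD j "" == ".") then h2.set j v else h2) h with hF
    have hFm : F.getD m 0 = h.getD m 0 := by
      rw [ih h (by omega) m]; simp
    by_cases hj : j = m
    · subst hj
      by_cases hc : (F.getD j 0 == 0 && !(row.getD j "" == ".")) = true
      · rw [if_pos hc]
        rw [show (F.set j v).getD j 0 = v by
          simp [List.getD_eq_getElem?_getD, (by omega : j < F.length)]]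
        simp only [beq_iff_eq, Bool.and_eq_true, Bool.not_eq_eq_eq_not, Bool.not_true,
          beq_eq_false_iff_ne, ne_eq, hFm] at hc
        rw [if_pos ⟨by omega, hc.1, hc.2⟩]
      · rw [if_neg hc, hFm]
        simp only [beq_iff_eq, Bool.and_eq_true, Bool.not_eq_eq_eq_not, Bool.not_true,
          beq_eq_false_iff_ne, ne_eq, hFm, not_and] at hc
        rw [if_neg (by intro hcc; exact hc hcc.2.1 hcc.2.2)]
    · have hstep : (if (F.getD m 0 == 0 && !(row.getD m "" == ".")) = true then F.set m v else F).getD j 0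
          = F.getD j 0 := by
        split_ifs with hc
        · simp [List.getD_eq_getElem?_getD, List.getElem?_set_ne (by omega : m ≠ j)]
        · rfl
      rw [hstep, ih h (by omega) j]
      refine if_congr ⟨fun ⟨h1, h2, h3⟩ => ⟨by omega, h2, h3⟩, fun ⟨h1, h2, h3⟩ => ⟨by omega, h2, h3⟩⟩ rfl rfl

theorem outer_length (m : Nat) (rows : Int) (l : List (Int × List String)) (h : List Int) :
    (l.foldl
        (fun h p => (List.range m).foldl
          (fun h2 j => if h2.getD j 0 == 0 && !(p.2.getD j "" == ".") then h2.set j (rows - p.1) else h2) h)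
        h).length = h.length := by
  induction l generalizing h with
  | nil => rfl
  | cons p t ih => rw [List.foldl_cons, ih, inner_length]

theorem outer_getD (m : Nat) (rows : Int) :
    ∀ (rest : List (List String)) (k : Int) (h : List Int), h.length = m → k + rest.length ≤ rows →
    ∀ j, j < m →
    ((PySem.List.enumerate rest k).foldl
        (fun h p => (List.range m).foldl
          (fun h2 j => if h2.getD j 0 == 0 && !(p.2.getD j "" == ".") then h2.set j (rows - p.1) else h2) h)
        h).getD j 0
      = if h.getD j 0 = 0 then
          (if pvWhileDots (rest.map (fun r => r.getD j "")) < rest.length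
           then rows - (k + (pvWhileDots (rest.map (fun r => r.getD j "")) : Int)) else 0)
        else h.getD j 0 := by
  intro rest
  induction rest with
  | nil =>
    intro k h hlen hk j hj
    simp [PySem.List.enumerate, pvWhileDots]
  | cons row rest' ih =>
    intro k h hlen hk j hj
    rw [PySem.List.enumerate_cons, List.foldl_cons]
    have hlen' : ((List.range m).foldl
        (fun h2 j => if h2.getD j 0 == 0 && !(((k, row).2.getD j "" == "."))
          then h2.set j (rows - (k, row).1) else h2) h).length = m := by
      rw [inner_length]; exact hlen
    have hval : ∀ j', ((List.range m).foldl
        (fun h2 j => if h2.getD j 0 == 0 && !(((k, row).2.getD j "" == "."))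
          then h2.set j (rows - (k, row).1) else h2) h).getD j' 0
        = if j' < m ∧ h.getD j' 0 = 0 ∧ row.getD j' "" ≠ "." then rows - k else h.getD j' 0 :=
      inner_getD (rows - k) row m h (by omega)
    have hk' : k + 1 + (rest'.length : Int) ≤ rows := by
      simp only [List.length_cons] at hk; push_cast at hk ⊢; omega
    rw [ih (k + 1) _ hlen' hk' j hj]
    simp only [List.length_cons, List.map_cons]
    by_cases h0 : h.getD j 0 = 0
    · by_cases hrow : row.getD j "" = "."
      · have hv : ((List.range m).foldl
            (fun h2 j => if h2.getD j 0 == 0 && !(((k, row).2.getD j "" == "."))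
              then h2.set j (rows - (k, row).1) else h2) h).getD j 0 = h.getD j 0 := by
          rw [hval j]; exact if_neg (fun hc => hc.2.2 hrow)
        rw [hv, if_pos h0, if_pos h0]
        have hfd : pvWhileDots (row.getD j "" :: rest'.map (fun r => r.getD j ""))
            = pvWhileDots (rest'.map (fun r => r.getD j "")) + 1 := by
          simp only [hrow]; simp [pvWhileDots]
        rw [hfd]
        by_cases hc : pvWhileDots (rest'.map (fun r => r.getD j "")) < rest'.length
        · rw [if_pos hc, if_pos (by omega)]
          push_cast; ring
        · rw [if_neg hc, if_neg (by omega)]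
      · have hne : rows - k ≠ 0 := by
          simp only [List.length_cons] at hk; push_cast at hk; omega
        have hv : ((List.range m).foldl
            (fun h2 j => if h2.getD j 0 == 0 && !(((k, row).2.getD j "" == "."))
              then h2.set j (rows - (k, row).1) else h2) h).getD j 0 = rows - k := by
          rw [hval j]; exact if_pos ⟨hj, h0, hrow⟩
        rw [hv, if_neg hne, if_pos h0]
        have hfd : pvWhileDots (row.getD j "" :: rest'.map (fun r => r.getD j "")) = 0 := by
          simp only [pvWhileDots, beq_iff_eq, if_neg hrow]
        rw [hfd, if_pos (by omega)]
        push_cast; ring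
    · have hv : ((List.range m).foldl
          (fun h2 j => if h2.getD j 0 == 0 && !(((k, row).2.getD j "" == "."))
            then h2.set j (rows - (k, row).1) else h2) h).getD j 0 = h.getD j 0 := by
        rw [hval j]; exact if_neg (fun hc => h0 hc.2.1)
      rw [hv, if_neg h0, if_neg h0]

theorem foldl_pair {α : Type} (f : α → Int) (g : Int → α → Int) :
    ∀ (l : List α) (a b : Int),
    l.foldl (fun st x => (st.1 + f x, g st.2 x)) (a, b) = (l.foldl (fun s x => s + f x) a, l.foldl g b) := by
  intro l
  induction l with
  | nil => intro a b; rfl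
  | cons x t ih => intro a b; rw [List.foldl_cons, List.foldl_cons, List.foldl_cons]; exact ih _ _

theorem foldl_maxish :
    ∀ (l : List Int) (s : Int), 0 ≤ s → (∀ x ∈ l, 0 ≤ x) →
    l.foldl (fun a h => if a == 0 || a < h then h else a) s = l.foldl max s := by
  intro l
  induction l with
  | nil => intro s _ _; rfl
  | cons x t ih =>
    intro s hs hmem
    have hx : 0 ≤ x := hmem x (by simp)
    rw [List.foldl_cons, List.foldl_cons]
    have hstep : (if s == 0 || s < x then x else s) = max s x := by
      simp only [beq_iff_eq, Bool.or_eq_true, decide_eq_true_eq]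
      split_ifs with hc
      · rcases hc with rfl | hc <;> omega
      · have hxs : x ≤ s := by omega
        exact (max_eq_left hxs).symm
    rw [hstep]
    exact ih (max s x) (le_trans hs (le_max_left _ _)) (fun y hy => hmem y (by simp [hy]))

theorem heights_spec : Claim_equal_heights := by
  intro board _
  unfold Spec_heights
  simp only [heights, heights_alt]
  set m := pvNcols board with hm
  set rows := (board.length : Int) with hrows
  set height := (PySem.List.enumerate board).foldl
      (fun (h : List Int) (p : Int × List String) =>
        (List.range m).foldl
          (fun h2 j => if h2.getD j 0 == 0 && !(p.2.getD j "" == ".") then h2.set j (rows - p.1) else h2) h)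
      (List.replicate m 0) with hheight
  have hlenH : height.length = m := by
    rw [hheight, outer_length]; simp
  have hH : height = (List.range m).map (fun j => pvH board j) := by
    apply List.ext_getElem
    · rw [hlenH]; simp
    · intro j hj1 hj2
      have hjm : j < m := by rwa [hlenH] at hj1
      rw [← List.getD_eq_getElem height 0 hj1, hheight,
        outer_getD m rows board 0 (List.replicate m 0) (by simp) (by rw [hrows]; omega) j hjm]
      have hle : pvWhileDots (board.map (fun r => r.getD j "")) ≤ board.length := by
        have := pvWhileDots_le (board.map (fun r => r.getD j ""))
        simpa using this
      have h0 : (List.replicate m 0).getD j 0 = (0 : Int) := by simp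
      rw [h0, if_pos rfl]
      simp only [List.getElem_map, List.getElem_range]
      unfold pvH
      rw [← hrows]
      split_ifs with hc
      · ring
      · omega
  rw [hH, foldl_pair (fun column => rows - (pvWhileDots column : Int))
      (fun s column => if s == 0 || s < rows - (pvWhileDots column : Int)
        then rows - (pvWhileDots column : Int) else s), Prod.mk.injEq]
  constructor
  · rw [List.foldl_map, List.foldl_map]
    unfold pvH
    rw [← hrows]
  · rw [← foldl_maxish ((List.range m).map (fun j => pvH board j)) 0 le_rfl
      (by intro x hx
          simp only [List.mem_map] at hx
          obtain ⟨j, _, rfl⟩ := hx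
          exact pvH_nonneg board j),
      List.foldl_map, List.foldl_map]
    unfold pvH
    rw [← hrows]
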